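-- pv_equiv track=rewrite | github.com/aws-samples/cloud-gateway-for-amazon-kinesis-video-streams | gstreamer-expert-system/mcp-gstreamer-expert/complete_multi_tool_server.py | _extract_platform_notes
-- ===== SOURCE A (Python) =====
-- from typing import Dict, List, Optional, Tuple
--
-- def _extract_platform_notes(content: str) -> List[str]:
--     """Extract platform-specific notes"""
--     notes = []
--
--     platforms = ['macos', 'linux', 'windows', 'nvidia', 'intel', 'vaapi', 'videotoolbox']
--
--     for platform in platforms:
--         if platform.lower() in content.lower():
--             sentences = content.split('.')
--             for sentence in sentences:
--                 if platform.lower() in sentence.lower() and len(sentence) < 150: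
--                     notes.append(f"{platform.upper()}: {sentence.strip()}")
--                     break
--
--     return notes[:3]
-- ===== SOURCE B (Python) =====
-- def _extract_platform_notes(content):
--     """Extract platform-specific notes"""
--     platforms = ['macos', 'linux', 'windows', 'nvidia', 'intel', 'vaapi', 'videotoolbox']
--     found = {}
--     for sentence in content.split('.'):
--         low = sentence.lower()
--         for platform in platforms:
--             if platform not in found and platform in low and len(sentence) < 150:
--                 found[platform] = sentence.strip()
--     return [f"{p.upper()}: {found[p]}" for p in platforms if p in found][:3]
-- ===== Notes on version B (the rewrite author's own statement) =====
-- stated objective: alternative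
-- what changed: Instead of re-lowering the whole text and re-splitting it into sentences once per platform (7 full passes), B lowers/splits the content once and makes a single pass over the sentences filling a platform-to-first-qualifying-sentence dict, then emits the notes in platform order.
import Mathlib
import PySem

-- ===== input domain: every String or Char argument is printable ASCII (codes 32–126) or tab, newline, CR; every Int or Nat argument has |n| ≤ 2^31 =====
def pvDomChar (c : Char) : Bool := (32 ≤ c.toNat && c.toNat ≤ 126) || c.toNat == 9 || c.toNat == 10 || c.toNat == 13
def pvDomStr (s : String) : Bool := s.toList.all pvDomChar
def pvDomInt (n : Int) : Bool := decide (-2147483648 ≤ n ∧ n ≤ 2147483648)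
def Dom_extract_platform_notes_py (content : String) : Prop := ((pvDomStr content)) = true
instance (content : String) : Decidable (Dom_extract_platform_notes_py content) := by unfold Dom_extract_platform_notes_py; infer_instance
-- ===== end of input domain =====

-- B replaces A's seven re-splits/re-lowerings of the whole text by one pass over the sentences
-- that fills a platform → first-qualifying-sentence dict, then emits notes in platform order (alternative decomposition).

-- the module-level constant list of platforms (shared data, used by both ports)
def pvPlatforms : List String := ["macos", "linux", "windows", "nvidia", "intel", "vaapi", "videotoolbox"]

-- ===== PORT A =====
-- 'for sentence in sentences: … break' appends the FIRST matching sentence: ported as List.find?.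
-- content.split('.') = Str.split? content "."; the separator "." is non-empty so split? is always `some` (getD [] unreachable).
def extract_platform_notes_py (content : String) : List String :=
  let notes : List String := []
  let platforms := pvPlatforms
  let notes := platforms.foldl (fun notes platform =>
    if PySem.Str.isIn (PySem.Str.lower platform) (PySem.Str.lower content) then
      let sentences := (PySem.Str.split? content ".").getD []
      match sentences.find? (fun sentence =>
          PySem.Str.isIn (PySem.Str.lower platform) (PySem.Str.lower sentence)
          && decide (PySem.Str.len sentence < 150)) with
      | some sentence => notes ++ [PySem.Str.upper platform ++ ": " ++ PySem.Str.strip sentence]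
      | none => notes
    else notes) notes
  PySem.List.slice notes none (some 3)

-- ===== PORT B =====
def extract_platform_notes_py_alt (content : String) : List String :=
  let found := ((PySem.Str.split? content ".").getD []).foldl (fun found sentence =>
      let low := PySem.Str.lower sentence
      pvPlatforms.foldl (fun found platform =>
        if !found.contains platform && PySem.Str.isIn platform low
            && decide (PySem.Str.len sentence < 150) then
          found.insert platform (PySem.Str.strip sentence)
        else found) found)
    (PySem.Dict.empty : PySem.Dict String String)
  PySem.List.slice (pvPlatforms.filterMap (fun p =>
    (found.get? p).map (fun v => PySem.Str.upper p ++ ": " ++ v))) none (some 3)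

-- ===== PRECONDITION & SPEC =====
def Spec_extract_platform_notes_py (content : String) (out : List String) : Prop := out = extract_platform_notes_py_alt content
instance (content : String) (out : List String) : Decidable (Spec_extract_platform_notes_py content out) := by unfold Spec_extract_platform_notes_py; infer_instance

-- ===== CLAIM (what is proved, stated in full; the proofs are below) =====
def Claim_equal_extract_platform_notes_py : Prop := ∀ (content : String), Dom_extract_platform_notes_py content → Spec_extract_platform_notes_py content (extract_platform_notes_py content)

-- ===== LEMMAS AND PROOFS =====

-- every piece produced by splitOn.go is an already-collected piece or sits inside cur.reverse ++ l
theorem pv_go_infix (fuel : Nat) (sep l cur : List Char) (acc : List (List Char)) (p : List Char)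
    (hp : p ∈ PySem.Chars.splitOn.go sep fuel l cur acc) : p ∈ acc ∨ p <:+: (cur.reverse ++ l) := by
  induction fuel generalizing l cur acc with
  | zero =>
    simp only [PySem.Chars.splitOn.go] at hp
    simp only [List.mem_reverse, List.mem_cons] at hp
    rcases hp with h | h
    · exact Or.inr (h ▸ List.infix_refl _)
    · exact Or.inl h
  | succ n ih =>
    cases l with
    | nil =>
      simp only [PySem.Chars.splitOn.go, List.mem_reverse, List.mem_cons] at hp
      rcases hp with h | h
      · exact Or.inr (h ▸ (cur.reverse.prefix_append []).isInfix)
      · exact Or.inl h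
    | cons c rest =>
      simp only [PySem.Chars.splitOn.go] at hp
      split at hp
      · rcases ih _ _ _ hp with h | h
        · simp only [List.mem_cons] at h
          rcases h with h | h
          · exact Or.inr (h ▸ (List.prefix_append _ _).isInfix)
          · exact Or.inl h
        · refine Or.inr (h.trans ?_)
          simp only [List.reverse_nil, List.nil_append]
          exact ((List.drop_suffix _ _).isInfix).trans (List.suffix_append _ _).isInfix
      · rcases ih _ _ _ hp with h | h
        · exact Or.inl h
        · exact Or.inr (by simpa using h)

-- every piece of s.split(sep) is an infix of s
theorem pv_mem_splitOn_infix (cs sep p : List Char) (hp : p ∈ PySem.Chars.splitOn cs sep) :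
    p <:+: cs := by
  have := pv_go_infix (cs.length + 1) sep cs [] [] p hp
  simpa using this

-- a substring of a lowered sentence of content.split('.') is a substring of the lowered content
theorem pv_isIn_content (content sub sentence : String)
    (hs : sentence ∈ (PySem.Str.split? content ".").getD [])
    (h : PySem.Str.isIn sub (PySem.Str.lower sentence) = true) :
    PySem.Str.isIn sub (PySem.Str.lower content) = true := by
  rw [PySem.Str.isIn_iff_infix] at h ⊢
  rw [PySem.Str.toList_lower] at h ⊢
  simp only [PySem.Str.split?, PySem.Chars.split?] at hs
  rw [if_neg (by simp)] at hs
  simp only [Option.getD_some, Option.map_some, List.mem_map] at hs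
  obtain ⟨q, hq, hqs⟩ := hs
  have hinf : q <:+: content.toList := pv_mem_splitOn_infix _ _ _ hq
  have hlist : sentence.toList = q := by rw [← hqs]; exact String.toList_ofList
  rw [hlist] at h
  exact h.trans (by simpa [PySem.Chars.lower] using List.IsInfix.map PySem.Chars.lowerChar hinf)

-- the seven platform literals are already lowercase
theorem pv_lower_platform (p : String) (hp : p ∈ pvPlatforms) : PySem.Str.lower p = p := by
  fin_cases hp <;> decide

-- B's inner loop: keys outside L are untouched
theorem pv_inner_not_mem (L : List String) (s : String) (d : PySem.Dict String String)
    (p : String) (hp : p ∉ L) :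
    (L.foldl (fun found platform =>
        if !found.contains platform && PySem.Str.isIn platform (PySem.Str.lower s)
            && decide (PySem.Str.len s < 150) then
          found.insert platform (PySem.Str.strip s)
        else found) d).get? p = d.get? p := by
  induction L generalizing d with
  | nil => rfl
  | cons q L ih =>
    simp only [List.mem_cons, not_or] at hp
    simp only [List.foldl_cons]
    rw [ih _ hp.2]
    split
    · exact PySem.Dict.get?_insert_of_ne _ _ hp.1
    · rfl

-- B's inner loop: a key of L gets the sentence iff it was still absent and the sentence qualifies
theorem pv_inner_mem (L : List String) (s : String) (d : PySem.Dict String String)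
    (p : String) (hp : p ∈ L) :
    (L.foldl (fun found platform =>
        if !found.contains platform && PySem.Str.isIn platform (PySem.Str.lower s)
            && decide (PySem.Str.len s < 150) then
          found.insert platform (PySem.Str.strip s)
        else found) d).get? p =
      (d.get? p).or (if PySem.Str.isIn p (PySem.Str.lower s)
          && decide (PySem.Str.len s < 150) then some (PySem.Str.strip s) else none) := by
  induction L generalizing d with
  | nil => cases hp
  | cons q L ih =>
    simp only [List.foldl_cons]
    by_cases hmem : p ∈ L
    · rw [ih _ hmem]
      by_cases hpq : p = q
      · subst hpq
        rw [PySem.Dict.contains_eq_isSome_get?]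
        cases hd : d.get? p with
        | some v => simp [hd]
        | none =>
          simp only [Option.isSome_none, Bool.not_false, Bool.true_and]
          split
          · simp [PySem.Dict.get?_insert_self]
          · simp [hd]
      · split
        · rw [PySem.Dict.get?_insert_of_ne _ _ hpq]
        · rfl
    · have hpq : p = q := by rcases List.mem_cons.mp hp with h | h; exact h; exact absurd h hmem
      subst hpq
      rw [pv_inner_not_mem L s _ p hmem]
      rw [PySem.Dict.contains_eq_isSome_get?]
      cases hd : d.get? p with
      | some v => simp [hd]
      | none =>
        simp only [Option.isSome_none, Bool.not_false, Bool.true_and]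
        split
        · simp [PySem.Dict.get?_insert_self]
        · simp [hd]

-- B's outer loop: the dict ends up holding the strip of the first qualifying sentence
theorem pv_outer (S : List String) (d : PySem.Dict String String) (p : String) (hp : p ∈ pvPlatforms) :
    (S.foldl (fun found sentence =>
        pvPlatforms.foldl (fun found platform =>
          if !found.contains platform && PySem.Str.isIn platform (PySem.Str.lower sentence)
              && decide (PySem.Str.len sentence < 150) then
            found.insert platform (PySem.Str.strip sentence)
          else found) found) d).get? p =
      (d.get? p).or ((S.find? (fun s => PySem.Str.isIn p (PySem.Str.lower s)
          && decide (PySem.Str.len s < 150))).map PySem.Str.strip) := by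
  induction S generalizing d with
  | nil => simp
  | cons s S ih =>
    simp only [List.foldl_cons, List.find?_cons]
    rw [ih, pv_inner_mem _ _ _ _ hp, Option.or_assoc]
    congr 1
    cases hb : PySem.Chars.isIn p.toList (PySem.Chars.lower s.toList) && decide (s.length < 150) with
    | true => simp [hb]
    | false => simp [hb]

-- A's loop over the platforms appends at most one note per platform: it is a filterMap
theorem pv_A_foldl (content : String) (L : List String) (ns : List String) :
    L.foldl (fun notes platform =>
      if PySem.Str.isIn (PySem.Str.lower platform) (PySem.Str.lower content) then
        match ((PySem.Str.split? content ".").getD []).find? (fun sentence =>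
            PySem.Str.isIn (PySem.Str.lower platform) (PySem.Str.lower sentence)
            && decide (PySem.Str.len sentence < 150)) with
        | some sentence => notes ++ [PySem.Str.upper platform ++ ": " ++ PySem.Str.strip sentence]
        | none => notes
      else notes) ns =
    ns ++ L.filterMap (fun platform =>
      if PySem.Str.isIn (PySem.Str.lower platform) (PySem.Str.lower content) then
        (((PySem.Str.split? content ".").getD []).find? (fun sentence =>
            PySem.Str.isIn (PySem.Str.lower platform) (PySem.Str.lower sentence)
            && decide (PySem.Str.len sentence < 150))).map
          (fun sentence => PySem.Str.upper platform ++ ": " ++ PySem.Str.strip sentence)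
      else none) := by
  induction L generalizing ns with
  | nil => simp
  | cons q L ih =>
    simp only [List.foldl_cons, List.filterMap_cons]
    rw [ih]
    split
    · cases hf : ((PySem.Str.split? content ".").getD []).find? (fun sentence =>
          PySem.Str.isIn (PySem.Str.lower q) (PySem.Str.lower sentence)
          && decide (PySem.Str.len sentence < 150)) with
      | some sentence => simp
      | none => simp
    · simp

-- ===== VERDICT (by name: the statement is the Claim_ definition above) =====
theorem extract_platform_notes_py_spec : Claim_equal_extract_platform_notes_py := by
  intro content _
  unfold Spec_extract_platform_notes_py
  show extract_platform_notes_py content = _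
  simp only [extract_platform_notes_py, extract_platform_notes_py_alt]
  rw [pv_A_foldl, List.nil_append]
  congr 1
  refine List.filterMap_congr (fun p hp => ?_)
  rw [pv_lower_platform p hp, pv_outer _ _ p hp, PySem.Dict.get?_empty, Option.none_or]
  by_cases hc : PySem.Str.isIn p (PySem.Str.lower content) = true
  · rw [if_pos hc, Option.map_map]
    rfl
  · rw [if_neg hc]
    cases hf : ((PySem.Str.split? content ".").getD []).find? (fun s =>
        PySem.Str.isIn p (PySem.Str.lower s) && decide (PySem.Str.len s < 150)) with
    | none => rfl
    | some s =>
      have hpred := List.find?_some hf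
      have hmem := List.mem_of_find?_eq_some hf
      have : PySem.Str.isIn p (PySem.Str.lower s) = true := by
        simp only [Bool.and_eq_true] at hpred; exact hpred.1
      exact absurd (pv_isIn_content content p s hmem this) hc
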